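-- pv_equiv track=rewrite | github.com/REportPad/Algorithm | programmers/lv0/369game.py | solution
-- ===== SOURCE A (Python) =====
-- def solution(order):
--     cnt = 0
--
--     while order > 0:
--         t = order%10
--         order = order // 10
--         if t%3 == 0 and t > 0:
--             cnt += 1
--
--     return cnt
-- ===== SOURCE B (Python) =====
-- def solution(order):
--     if order <= 0:
--         return 0
--     return sum(1 for c in str(order) if c in '369')
-- ===== Notes on version B (the rewrite author's own statement) =====
-- stated objective: idiomatic
-- what changed: Replaces the arithmetic digit-peeling while loop with a single comprehension counting the characters '3','6','9' in the decimal string representation.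
import Mathlib
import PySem

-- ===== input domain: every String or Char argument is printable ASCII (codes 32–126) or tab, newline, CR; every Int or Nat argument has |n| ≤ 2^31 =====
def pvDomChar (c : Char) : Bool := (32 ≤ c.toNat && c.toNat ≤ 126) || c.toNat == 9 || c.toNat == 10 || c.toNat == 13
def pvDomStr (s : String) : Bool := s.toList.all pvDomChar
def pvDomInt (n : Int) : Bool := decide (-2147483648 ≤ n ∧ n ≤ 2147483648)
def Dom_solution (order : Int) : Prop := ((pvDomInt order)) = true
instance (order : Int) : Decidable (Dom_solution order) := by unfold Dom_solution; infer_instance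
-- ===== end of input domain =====

-- B counts the characters '3','6','9' in str(order) instead of peeling digits arithmetically (idiomatic).

-- ===== PORT A =====
-- the while loop, with (order, cnt) as the mutable state
def solutionGo (order cnt : Int) : Int :=
  if h : order > 0 then
    let t := PySem.Int.mod order 10
    solutionGo (PySem.Int.floordiv order 10)
      (if PySem.Int.mod t 3 = 0 ∧ t > 0 then cnt + 1 else cnt)
  else cnt
termination_by order.toNat
decreasing_by
  have h10 : PySem.Int.floordiv order 10 = order / 10 := by
    simp [PySem.Int.floordiv, Int.fdiv_eq_ediv_of_nonneg _ (by norm_num : (0:Int) ≤ 10)]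
  omega

def solution (order : Int) : Int := solutionGo order 0

-- ===== PORT B =====
-- 'c in "369"' ported as membership in the character list of "369"
def solution_alt (order : Int) : Int :=
  if order ≤ 0 then 0
  else ((PySem.Int.toStr order).toList.countP (fun c => ("369".toList).contains c) : Int)

-- ===== PRECONDITION & SPEC =====
def Spec_solution (order : Int) (out : Int) : Prop := out = solution_alt order
instance (order : Int) (out : Int) : Decidable (Spec_solution order out) := by unfold Spec_solution; infer_instance

-- ===== CLAIM (what is proved, stated in full; the proofs are below) =====
def Claim_equal_solution : Prop := ∀ (order : Int), Dom_solution order → Spec_solution order (solution order)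

-- ===== LEMMAS AND PROOFS =====

-- the digit predicate both programs compute, on a Nat digit
def pvQ : Nat → Bool := fun d => decide (d % 3 = 0 ∧ 0 < d)

def pvP : Char → Bool := fun c => ("369".toList).contains c

lemma pvP_digitChar (d : Nat) (hd : d < 10) : pvP (Nat.digitChar d) = pvQ d := by
  interval_cases d <;> decide

lemma countP_toDigitsCore (f : Nat) : ∀ (n : Nat) (l : List Char), 0 < n → n < 10 ^ f →
    List.countP pvP (Nat.toDigitsCore 10 f n l)
      = (Nat.digits 10 n).countP pvQ + List.countP pvP l := by
  induction f with
  | zero => intro n l hn hlt; omega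
  | succ f ih =>
    intro n l hn hlt
    rw [Nat.toDigitsCore]
    by_cases h0 : n / 10 = 0
    · have hn10 : n < 10 := by omega
      simp only [h0, if_true]
      rw [Nat.digits_def' (by norm_num) hn, Nat.mod_eq_of_lt hn10, h0]
      simp [List.countP_cons, pvP_digitChar n hn10]
      cases hq : pvQ n <;> simp [hq] <;> omega
    · simp only [h0, if_false]
      have h1 : 0 < n / 10 := Nat.pos_of_ne_zero h0
      have h2 : n / 10 < 10 ^ f := by
        have := Nat.div_lt_of_lt_mul (by rw [← pow_succ']; exact hlt)
        exact this
      rw [ih (n / 10) _ h1 h2, Nat.digits_def' (by norm_num) hn]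
      have hm : n % 10 < 10 := Nat.mod_lt _ (by norm_num)
      simp [List.countP_cons, pvP_digitChar _ hm]
      cases hq : pvQ (n % 10) <;> simp [hq] <;> omega

lemma solutionGo_eq (n : Nat) : ∀ cnt : Int,
    solutionGo (n : Int) cnt = cnt + ((Nat.digits 10 n).countP pvQ : Int) := by
  induction n using Nat.strong_induction_on with
  | _ n ih =>
    intro cnt
    rw [solutionGo]
    by_cases hn : (n : Int) > 0
    · have hn' : 0 < n := by exact_mod_cast hn
      simp only [hn, dif_pos]
      have hmod : PySem.Int.mod (n : Int) 10 = ((n % 10 : Nat) : Int) := by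
        simp [PySem.Int.mod, Int.fmod_eq_emod_of_nonneg _ (by norm_num : (0:Int) ≤ 10)]
      have hdiv : PySem.Int.floordiv (n : Int) 10 = ((n / 10 : Nat) : Int) := by
        simp [PySem.Int.floordiv, Int.fdiv_eq_ediv_of_nonneg _ (by norm_num : (0:Int) ≤ 10)]
      rw [hmod, hdiv, ih (n / 10) (Nat.div_lt_self hn' (by norm_num))]
      rw [Nat.digits_def' (by norm_num) hn']
      have hcond : (PySem.Int.mod ((n % 10 : Nat) : Int) 3 = 0 ∧ ((n % 10 : Nat) : Int) > 0)
          ↔ (n % 10 % 3 = 0 ∧ 0 < n % 10) := by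
        simp [PySem.Int.mod, Int.fmod_eq_emod_of_nonneg _ (by norm_num : (0:Int) ≤ 3)]
        omega
      by_cases hq : n % 10 % 3 = 0 ∧ 0 < n % 10
      · rw [if_pos (hcond.mpr hq)]
        simp [List.countP_cons, pvQ, hq.1, hq.2]
        ring
      · rw [if_neg (fun h => hq (hcond.mp h))]
        have : pvQ (n % 10) = false := by simp [pvQ]; omega
        simp [List.countP_cons, this]
    · have : n = 0 := by omega
      subst this
      simp [solutionGo]

-- ===== VERDICT (by name: the statement is the Claim_ definition above) =====
theorem solution_spec : Claim_equal_solution := by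
  intro order _
  unfold Spec_solution solution solution_alt
  by_cases hpos : order > 0
  · have hneg : ¬ order ≤ 0 := by omega
    rw [if_neg hneg]
    obtain ⟨n, rfl⟩ : ∃ n : Nat, order = (n : Int) :=
      ⟨order.toNat, by omega⟩
    have hn : 0 < n := by exact_mod_cast hpos
    rw [solutionGo_eq n 0]
    have htl : (PySem.Int.toStr (n : Int)).toList = Nat.toDigits 10 n := by
      rw [PySem.Int.toList_toStr]
      simp [PySem.Int.toChars]
    rw [htl]
    have hbound : n < 10 ^ (n + 1) :=
      lt_of_lt_of_le (Nat.lt_pow_self (by norm_num)) (Nat.pow_le_pow_right (by norm_num) (by omega))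
    have := countP_toDigitsCore (n + 1) n [] hn hbound
    unfold Nat.toDigits
    rw [show (fun c => ("369".toList).contains c) = pvP from rfl, this]
    simp
  · have hle : order ≤ 0 := by omega
    rw [if_pos hle, solutionGo, dif_neg hpos]
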